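-- pv_equiv track=rewrite | github.com/DavidFeng-8844/Leeds_Python_Assessment | cwk1/cwk1.py | similarity_grouping
-- ===== SOURCE A (Python) =====
-- def similarity_grouping(data: list) -> list:
--     if not isinstance(data, list):
--         return []
--
--     grouped_data = []  # List to store grouped data
--     seen = set()  # Set to keep track of seen items
--
--     for item in data:
--         item_str = str(item)  # Convert the data into a string
--
--         if item_str not in seen:
--             seen.add(item_str)
--             # A list contains the same elements as item_str in data.
--             group = [x for x in data if str(x) == item_str]
--             grouped_data.append(group)
--
--     return grouped_data
-- ===== SOURCE B (Python) =====
-- def similarity_grouping(data: list) -> list: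
--     groups = {}
--     for item in data:
--         groups.setdefault(str(item), []).append(item)
--     return list(groups.values())
-- ===== Notes on version B (the rewrite author's own statement) =====
-- stated objective: faster
-- what changed: Replaces A's per-new-group full rescan of data (a filter comparing str(x) for every element, once per distinct value) by a single pass that appends each item into a dict of groups keyed by str(item), returning the dict's values in insertion order.
import Mathlib
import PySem

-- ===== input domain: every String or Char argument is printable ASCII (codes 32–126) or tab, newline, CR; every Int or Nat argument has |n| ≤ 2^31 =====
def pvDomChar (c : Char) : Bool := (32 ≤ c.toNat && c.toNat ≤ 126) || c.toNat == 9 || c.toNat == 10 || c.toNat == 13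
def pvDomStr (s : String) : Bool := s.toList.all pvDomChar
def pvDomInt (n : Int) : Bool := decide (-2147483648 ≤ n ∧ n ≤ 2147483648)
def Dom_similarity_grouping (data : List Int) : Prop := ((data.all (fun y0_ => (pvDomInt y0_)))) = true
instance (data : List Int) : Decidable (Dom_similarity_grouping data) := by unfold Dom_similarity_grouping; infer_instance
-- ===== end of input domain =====

-- B replaces A's per-new-group full rescan of data with one dict-building pass (groups keyed
-- by str(item), values in insertion order); equivalence is about the return value only.

-- ===== PORT A =====
-- for item in data: if str(item) not in seen: seen.add; grouped.append([x for x in data if str(x)==str(item)])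
def similarity_grouping (data : List Int) : List (List Int) :=
  (data.foldl
    (fun (st : PySem.Set String × List (List Int)) item =>
      let itemStr := PySem.Int.toStr item
      if PySem.Set.contains st.1 itemStr then st
      else (PySem.Set.add st.1 itemStr,
            st.2 ++ [data.filter (fun x => PySem.Int.toStr x == itemStr)]))
    ((PySem.Set.empty : PySem.Set String), ([] : List (List Int)))).2

-- ===== PORT B =====
-- groups.setdefault(str(item), []).append(item); return list(groups.values())
def similarity_grouping_alt (data : List Int) : List (List Int) :=
  (data.foldl
    (fun (d : PySem.Dict String (List Int)) item =>
      d.modify (PySem.Int.toStr item) [] (fun g => g ++ [item]))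
    PySem.Dict.empty).values

-- ===== PRECONDITION & SPEC =====
def Spec_similarity_grouping (data : List Int) (out : List (List Int)) : Prop := out = similarity_grouping_alt data
instance (data : List Int) (out : List (List Int)) : Decidable (Spec_similarity_grouping data out) := by unfold Spec_similarity_grouping; infer_instance

-- ===== CLAIM (what is proved, stated in full; the proofs are below) =====
def Claim_equal_similarity_grouping : Prop := ∀ (data : List Int), Dom_similarity_grouping data → Spec_similarity_grouping data (similarity_grouping data)

-- ===== LEMMAS AND PROOFS =====

-- loop invariant for A: after processing the prefix `pre`, seen = set of strings of `pre`
-- and the groups list is one full-data filter per first-occurrence key of `pre`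
theorem simA_loop (data rest pre : List Int) :
    rest.foldl
      (fun (st : PySem.Set String × List (List Int)) item =>
        let itemStr := PySem.Int.toStr item
        if PySem.Set.contains st.1 itemStr then st
        else (PySem.Set.add st.1 itemStr,
              st.2 ++ [data.filter (fun x => PySem.Int.toStr x == itemStr)]))
      (PySem.Set.ofList (pre.map PySem.Int.toStr),
       (PySem.Set.ofList (pre.map PySem.Int.toStr)).map
         (fun s => data.filter (fun x => PySem.Int.toStr x == s)))
    = (PySem.Set.ofList ((pre ++ rest).map PySem.Int.toStr),
       (PySem.Set.ofList ((pre ++ rest).map PySem.Int.toStr)).map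
         (fun s => data.filter (fun x => PySem.Int.toStr x == s))) := by
  induction rest generalizing pre with
  | nil => simp
  | cons item rest ih =>
    have hset : PySem.Set.ofList ((pre ++ [item]).map PySem.Int.toStr)
        = PySem.Set.add (PySem.Set.ofList (pre.map PySem.Int.toStr)) (PySem.Int.toStr item) := by
      simp [PySem.Set.ofList_eq_foldl, List.foldl_append]
    have hstep :
        (fun (st : PySem.Set String × List (List Int)) item =>
          let itemStr := PySem.Int.toStr item
          if PySem.Set.contains st.1 itemStr then st
          else (PySem.Set.add st.1 itemStr,
                st.2 ++ [data.filter (fun x => PySem.Int.toStr x == itemStr)]))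
          (PySem.Set.ofList (pre.map PySem.Int.toStr),
           (PySem.Set.ofList (pre.map PySem.Int.toStr)).map
             (fun s => data.filter (fun x => PySem.Int.toStr x == s)))
          item
        = (PySem.Set.ofList ((pre ++ [item]).map PySem.Int.toStr),
           (PySem.Set.ofList ((pre ++ [item]).map PySem.Int.toStr)).map
             (fun s => data.filter (fun x => PySem.Int.toStr x == s))) := by
      rw [hset]
      by_cases h : ∃ a ∈ pre, PySem.Int.toStr a = PySem.Int.toStr item
      · simp [PySem.Set.add, PySem.Set.contains, h]
      · simp [PySem.Set.add, PySem.Set.contains, h]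
    simp only [List.foldl_cons, hstep]
    have := ih (pre ++ [item])
    simpa [List.append_assoc] using this

-- closed form for A
theorem simA_eq (data : List Int) :
    similarity_grouping data
    = (PySem.Set.ofList (data.map PySem.Int.toStr)).map
        (fun s => data.filter (fun x => PySem.Int.toStr x == s)) := by
  have h := simA_loop data data []
  simp only [List.nil_append] at h
  unfold similarity_grouping
  exact congrArg Prod.snd h

-- closed form for B: the dict's values are the same first-occurrence-keyed filters
theorem simB_eq (data : List Int) :
    similarity_grouping_alt data
    = (PySem.Set.ofList (data.map PySem.Int.toStr)).map
        (fun s => data.filter (fun x => PySem.Int.toStr x == s)) := by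
  unfold similarity_grouping_alt
  set D := data.foldl
    (fun (d : PySem.Dict String (List Int)) item =>
      d.modify (PySem.Int.toStr item) [] (fun g => g ++ [item]))
    PySem.Dict.empty with hD
  have hpairs : D = (data.map (fun x => (PySem.Int.toStr x, x))).foldl
      (fun (d : PySem.Dict String (List Int)) p => d.modify p.1 [] (fun g => g ++ [p.2]))
      PySem.Dict.empty := by
    rw [hD, List.foldl_map]
  have hnodup : D.keys.Nodup := by
    rw [hD]
    exact PySem.Dict.nodup_keys_foldl_modify_key data PySem.Int.toStr []
      (fun _ item => fun g => g ++ [item]) PySem.Dict.empty PySem.Dict.nodup_keys_empty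
  have hkeys : D.keys = PySem.Set.ofList (data.map PySem.Int.toStr) := by
    rw [hD, PySem.Dict.keys_foldl_modify_key]
    rfl
  have hget : ∀ s, D.getD s [] = data.filter (fun x => PySem.Int.toStr x == s) := by
    intro s
    rw [hpairs, PySem.Dict.getD_foldl_modify_append]
    simp [List.filter_map, List.map_map, Function.comp_def]
  rw [PySem.Dict.values_eq_map_keys D hnodup [], hkeys]
  exact List.map_congr_left (fun s _ => hget s)

-- ===== VERDICT (by name: the statement is the Claim_ definition above) =====
theorem similarity_grouping_spec : Claim_equal_similarity_grouping := by
  intro data _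
  unfold Spec_similarity_grouping
  rw [simA_eq, simB_eq]
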